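-- pv_equiv track=rewrite | github.com/jaek-s/advent-of-code-2023 | day02/solver.py | game_is_possible
-- ===== SOURCE A (Python) =====
-- MAX_RED = 12
--
-- MAX_GREEN = 13
--
-- MAX_BLUE = 14
--
-- def game_is_possible(game: list[dict[str, int]]):
--     for round in game:
--         if (
--             round.get("red", 0) > MAX_RED
--             or round.get("green", 0) > MAX_GREEN
--             or round.get("blue", 0) > MAX_BLUE
--         ):
--             return False
--
--     return True
-- ===== SOURCE B (Python) =====
-- MAX_RED = 12
--
-- MAX_GREEN = 13
--
-- MAX_BLUE = 14
--
-- def game_is_possible(game):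
--     max_red = max((r.get("red", 0) for r in game), default=0)
--     max_green = max((r.get("green", 0) for r in game), default=0)
--     max_blue = max((r.get("blue", 0) for r in game), default=0)
--     return max_red <= MAX_RED and max_green <= MAX_GREEN and max_blue <= MAX_BLUE
-- ===== Notes on version B (the rewrite author's own statement) =====
-- stated objective: alternative
-- what changed: Replaces A's short-circuiting per-round scan (return False at the first offending round) with three whole-game per-color maximum aggregations followed by a single threshold conjunction.
import Mathlib
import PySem

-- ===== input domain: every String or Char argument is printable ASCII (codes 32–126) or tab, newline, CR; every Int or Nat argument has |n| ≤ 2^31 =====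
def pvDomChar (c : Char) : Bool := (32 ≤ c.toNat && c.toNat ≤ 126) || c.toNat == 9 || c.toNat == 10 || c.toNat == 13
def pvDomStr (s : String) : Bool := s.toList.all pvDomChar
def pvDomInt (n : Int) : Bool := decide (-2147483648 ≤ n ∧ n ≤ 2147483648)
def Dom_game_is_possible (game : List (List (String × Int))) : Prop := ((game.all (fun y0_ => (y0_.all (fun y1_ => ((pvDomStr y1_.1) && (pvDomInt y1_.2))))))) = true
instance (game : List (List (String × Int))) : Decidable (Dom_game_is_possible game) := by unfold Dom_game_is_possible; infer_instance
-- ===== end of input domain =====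

-- B replaces A's short-circuiting per-round scan with three per-color maximum
-- aggregations over the whole game and one final threshold conjunction (objective: alternative).

def pvMAX_RED : Int := 12
def pvMAX_GREEN : Int := 13
def pvMAX_BLUE : Int := 14

-- round.get(c, 0) on a dict given as an association list
def pvGetColor (r : List (String × Int)) (c : String) : Int :=
  (PySem.Dict.mk r).getD c 0

-- ===== PORT A =====
def game_is_possible (game : List (List (String × Int))) : Bool :=
  match game with
  | [] => true
  | round :: rest =>
    if pvGetColor round "red" > pvMAX_RED
        || pvGetColor round "green" > pvMAX_GREEN
        || pvGetColor round "blue" > pvMAX_BLUE then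
      false
    else
      game_is_possible rest

-- ===== PORT B =====
-- max(generator, default=0): 0 on the empty list, else a left fold of max from the head
def pvMaxD (l : List Int) : Int :=
  match l with
  | [] => 0
  | x :: xs => xs.foldl max x

def game_is_possible_alt (game : List (List (String × Int))) : Bool :=
  let maxRed := pvMaxD (game.map (fun r => pvGetColor r "red"))
  let maxGreen := pvMaxD (game.map (fun r => pvGetColor r "green"))
  let maxBlue := pvMaxD (game.map (fun r => pvGetColor r "blue"))
  decide (maxRed ≤ pvMAX_RED) && decide (maxGreen ≤ pvMAX_GREEN) && decide (maxBlue ≤ pvMAX_BLUE)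

-- ===== PRECONDITION & SPEC =====
def Spec_game_is_possible (game : List (List (String × Int))) (out : Bool) : Prop := out = game_is_possible_alt game
instance (game : List (List (String × Int))) (out : Bool) : Decidable (Spec_game_is_possible game out) := by unfold Spec_game_is_possible; infer_instance

-- ===== CLAIM (what is proved, stated in full; the proofs are below) =====
def Claim_equal_game_is_possible : Prop := ∀ (game : List (List (String × Int))), Dom_game_is_possible game → Spec_game_is_possible game (game_is_possible game)

-- ===== LEMMAS AND PROOFS =====

theorem pv_foldl_max_le (xs : List Int) (a c : Int) :
    xs.foldl max a ≤ c ↔ a ≤ c ∧ ∀ x ∈ xs, x ≤ c := by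
  induction xs generalizing a with
  | nil => simp
  | cons y ys ih =>
    simp [List.foldl_cons, ih]
    tauto

theorem pvMaxD_le (l : List Int) (c : Int) (hc : 0 ≤ c) :
    pvMaxD l ≤ c ↔ ∀ x ∈ l, x ≤ c := by
  cases l with
  | nil => simpa [pvMaxD] using hc
  | cons x xs =>
    simp [pvMaxD, pv_foldl_max_le]

theorem gip_iff (game : List (List (String × Int))) :
    game_is_possible game = true ↔
      ∀ r ∈ game, pvGetColor r "red" ≤ pvMAX_RED ∧ pvGetColor r "green" ≤ pvMAX_GREEN ∧
        pvGetColor r "blue" ≤ pvMAX_BLUE := by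
  induction game with
  | nil => simp [game_is_possible]
  | cons r rest ih =>
    by_cases h : pvGetColor r "red" > pvMAX_RED ∨ pvGetColor r "green" > pvMAX_GREEN ∨
        pvGetColor r "blue" > pvMAX_BLUE
    · constructor
      · intro hfalse
        exfalso
        simp only [game_is_possible] at hfalse
        rw [if_pos] at hfalse
        · exact Bool.false_ne_true hfalse
        · simpa [decide_eq_true_iff, or_assoc] using h
      · intro hall
        exfalso
        have := hall r (List.mem_cons_self ..)
        omega
    · push Not at h
      simp only [game_is_possible]
      rw [if_neg]
      · rw [ih]
        constructor
        · intro hall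
          intro x hx
          rcases List.mem_cons.mp hx with rfl | hx'
          · exact ⟨h.1, h.2.1, h.2.2⟩
          · exact hall x hx'
        · intro hall x hx
          exact hall x (List.mem_cons_of_mem _ hx)
      · simp only [Bool.or_eq_true, decide_eq_true_iff, not_or]
        omega

theorem gip_alt_iff (game : List (List (String × Int))) :
    game_is_possible_alt game = true ↔
      ∀ r ∈ game, pvGetColor r "red" ≤ pvMAX_RED ∧ pvGetColor r "green" ≤ pvMAX_GREEN ∧
        pvGetColor r "blue" ≤ pvMAX_BLUE := by
  simp only [game_is_possible_alt, Bool.and_eq_true, decide_eq_true_iff]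
  rw [pvMaxD_le _ _ (by norm_num [pvMAX_RED]), pvMaxD_le _ _ (by norm_num [pvMAX_GREEN]),
      pvMaxD_le _ _ (by norm_num [pvMAX_BLUE])]
  simp only [List.forall_mem_map]
  constructor
  · rintro ⟨⟨h1, h2⟩, h3⟩ r hr
    exact ⟨h1 r hr, h2 r hr, h3 r hr⟩
  · intro h
    exact ⟨⟨fun r hr => (h r hr).1, fun r hr => (h r hr).2.1⟩, fun r hr => (h r hr).2.2⟩

-- ===== VERDICT (by name: the statement is the Claim_ definition above) =====
theorem game_is_possible_spec : Claim_equal_game_is_possible := by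
  intro game _
  unfold Spec_game_is_possible
  have := (gip_iff game).trans (gip_alt_iff game).symm
  cases hA : game_is_possible game <;> cases hB : game_is_possible_alt game <;>
    simp_all
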